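-- pv_equiv track=rewrite | github.com/lord230/Sorting_visuals | app.py | sleep_sort
-- ===== SOURCE A (Python) =====
-- def sleep_sort(data):
--     frames = []
--     arr = data.copy()
--     indices = sorted(range(len(arr)), key=lambda i: arr[i])
--     sorted_arr = [0] * len(arr)
--     for i, idx in enumerate(indices):
--         sorted_arr[i] = arr[idx]
--         frames.append((sorted_arr.copy(), i, i))
--     return frames
-- ===== SOURCE B (Python) =====
-- def sleep_sort(data):
--     # selection: repeatedly extract the minimum of the remaining pool,
--     # growing the sorted prefix one element per frame; no sorting call at all
--     rest = data.copy()
--     frames = []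
--     prefix = []
--     while rest:
--         m = min(rest)
--         rest.remove(m)
--         prefix.append(m)
--         i = len(prefix) - 1
--         frames.append((prefix + [0] * len(rest), i, i))
--     return frames
-- ===== Notes on version B (the rewrite author's own statement) =====
-- stated objective: alternative
-- what changed: Replaces the one-shot argsort plus in-place accumulator buffer with a selection loop: repeatedly extract min() from the remaining pool and grow the sorted prefix one element per frame, never calling sorted().
import Mathlib
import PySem

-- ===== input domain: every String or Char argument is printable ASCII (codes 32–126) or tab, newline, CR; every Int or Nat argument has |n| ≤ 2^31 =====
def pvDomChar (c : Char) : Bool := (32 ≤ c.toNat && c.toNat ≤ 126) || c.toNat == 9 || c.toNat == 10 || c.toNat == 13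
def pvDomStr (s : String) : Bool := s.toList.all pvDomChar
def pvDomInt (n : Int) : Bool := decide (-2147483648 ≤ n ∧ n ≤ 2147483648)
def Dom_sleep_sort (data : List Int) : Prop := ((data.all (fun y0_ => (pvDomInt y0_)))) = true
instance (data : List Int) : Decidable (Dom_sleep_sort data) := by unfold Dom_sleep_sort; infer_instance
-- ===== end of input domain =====

-- B replaces A's argsort + in-place accumulator buffer by a selection loop (repeated
-- min-extraction from the remaining pool, growing the prefix per frame); objective: alternative.

-- ===== PORT A =====
def sleep_sort (data : List Int) : List (List Int × Int × Int) :=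
  let arr := data
  let indices := PySem.List.sorted (PySem.List.pyRange 0 (arr.length : Int) 1)
                   (fun i => PySem.List.pyGetD arr i 0) false
  let init : List Int := List.replicate arr.length 0
  ((PySem.List.enumerate indices 0).foldl
    (fun (st : List (List Int × Int × Int) × List Int) p =>
      let sorted_arr := PySem.List.pySetD st.2 p.1 (PySem.List.pyGetD arr p.2 0)
      (st.1 ++ [(sorted_arr, p.1, p.1)], sorted_arr))
    ([], init)).1

-- ===== PORT B =====
-- termination fact for the selection loop (cited by decreasing_by)
theorem pvRemoveMinLen (rest rest' : List Int) (m : Int)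
    (hm : PySem.List.min? rest (fun x => x) = some m)
    (h : PySem.List.remove? rest m = some rest') : rest'.length < rest.length := by
  have hmem := PySem.List.min?_mem hm
  rw [PySem.List.remove?_eq_some_erase rest m hmem] at h
  cases h
  have := List.length_erase_of_mem hmem
  have : rest.length ≠ 0 := by
    intro h0; rw [List.length_eq_zero_iff] at h0; subst h0; simp at hmem
  omega

-- B's while loop: pop the minimum of `rest`, append to `pre`, emit a frame
def pvSelLoop (rest pre : List Int) (frames : List (List Int × Int × Int)) :
    List (List Int × Int × Int) :=
  match hm : PySem.List.min? rest (fun x => x) with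
  | none => frames
  | some m =>
    match h2 : PySem.List.remove? rest m with
    | none => frames   -- unreachable (m ∈ rest); totality guard only
    | some rest' =>
      let pre' := pre ++ [m]
      let i : Int := (pre'.length : Int) - 1
      pvSelLoop rest' pre' (frames ++ [(pre' ++ List.replicate rest'.length 0, i, i)])
termination_by rest.length
decreasing_by exact pvRemoveMinLen rest rest' m hm h2

def sleep_sort_alt (data : List Int) : List (List Int × Int × Int) :=
  pvSelLoop data [] []

-- ===== PRECONDITION & SPEC =====
def Spec_sleep_sort (data : List Int) (out : List (List Int × Int × Int)) : Prop := out = sleep_sort_alt data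
instance (data : List Int) (out : List (List Int × Int × Int)) : Decidable (Spec_sleep_sort data out) := by unfold Spec_sleep_sort; infer_instance

-- ===== CLAIM (what is proved, stated in full; the proofs are below) =====
def Claim_equal_sleep_sort : Prop := ∀ (data : List Int), Dom_sleep_sort data → Spec_sleep_sort data (sleep_sort data)

-- ===== LEMMAS AND PROOFS =====

-- the values picked by A's argsort indices are exactly sorted(arr)
theorem vals_eq_sorted (arr : List Int) :
    (PySem.List.sorted (PySem.List.pyRange 0 (arr.length : Int) 1)
       (fun i => PySem.List.pyGetD arr i 0) false).map (fun i => PySem.List.pyGetD arr i 0)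
      = PySem.List.sorted arr (fun x => x) false := by
  symm
  apply PySem.List.sorted_id_eq_of_perm_of_pairwise
  · have h := (PySem.List.sorted_perm (PySem.List.pyRange 0 (arr.length : Int) 1)
        (fun i => PySem.List.pyGetD arr i 0) false).map (fun i => PySem.List.pyGetD arr i 0)
    have h2 : List.map (fun i => PySem.List.pyGetD arr i 0) (PySem.List.pyRange 0 (arr.length : Int)) = arr :=
      PySem.List.map_pyGetD_pyRange_zero arr 0
    rw [h2] at h
    exact h
  · rw [List.pairwise_map]
    exact PySem.List.sorted_pairwise _ _

theorem set_append_len {α : Type} (v t : List α) (a b : α) :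
    (v ++ a :: t).set v.length b = v ++ b :: t := by
  induction v with
  | nil => rfl
  | cons h tl ih => simp [ih]

-- A's loop, generalized: v = already-built sorted prefix, l = remaining indices
theorem loop_eq (arr : List Int) (l : List Int) (v : List Int) (F : List (List Int × Int × Int)) :
    ((PySem.List.enumerate l (v.length : Int)).foldl
      (fun (st : List (List Int × Int × Int) × List Int) p =>
        let sorted_arr := PySem.List.pySetD st.2 p.1 (PySem.List.pyGetD arr p.2 0)
        (st.1 ++ [(sorted_arr, p.1, p.1)], sorted_arr))
      (F, v ++ List.replicate l.length 0)).1
    = F ++ (List.range l.length).map (fun k =>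
        (v ++ (l.map (fun i => PySem.List.pyGetD arr i 0)).take (k + 1)
           ++ List.replicate (l.length - k - 1) 0,
         ((v.length + k : Nat) : Int), ((v.length + k : Nat) : Int))) := by
  induction l generalizing v F with
  | nil => simp [PySem.List.enumerate]
  | cons x rest ih =>
    rw [PySem.List.enumerate_cons, List.length_cons, List.replicate_succ, List.foldl_cons]
    have hsa : PySem.List.pySetD (v ++ (0:Int) :: List.replicate rest.length 0) (v.length : Int)
        (PySem.List.pyGetD arr x 0)
        = (v ++ [PySem.List.pyGetD arr x 0]) ++ List.replicate rest.length 0 := by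
      rw [PySem.List.pySetD_natCast, set_append_len]
      simp
    have hlen : (v.length : Int) + 1 = (((v ++ [PySem.List.pyGetD arr x 0]).length : Nat) : Int) := by
      simp
    simp only [hsa, hlen]
    rw [ih]
    simp [List.range_succ_eq_map, List.map_map, Function.comp, List.take_succ_cons]
    intro a _
    omega

-- extracting the first minimum and sorting the remainder = uncons of sorted
theorem sorted_cons_min (rest rest' : List Int) (m : Int)
    (hm : PySem.List.min? rest (fun x => x) = some m)
    (h : PySem.List.remove? rest m = some rest') :
    PySem.List.sorted rest (fun x => x) false
      = m :: PySem.List.sorted rest' (fun x => x) false := by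
  have hmem := PySem.List.min?_mem hm
  rw [PySem.List.remove?_eq_some_erase rest m hmem] at h
  cases h
  apply PySem.List.sorted_id_eq_of_perm_of_pairwise
  · exact ((PySem.List.sorted_perm _ _ _).cons m).trans (List.perm_cons_erase hmem).symm
  · constructor
    · intro b hb
      exact PySem.List.min?_isMin hm b (List.mem_of_mem_erase ((PySem.List.mem_sorted _ _ _ _).1 hb))
    · exact PySem.List.sorted_pairwise _ _

-- B's selection loop builds the (sorted rest)-prefix frames
theorem selLoop_eq (n : Nat) (rest pre : List Int) (F : List (List Int × Int × Int))
    (hn : rest.length = n) :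
    pvSelLoop rest pre F
      = F ++ (List.range rest.length).map (fun k =>
          (pre ++ (PySem.List.sorted rest (fun x => x) false).take (k + 1)
             ++ List.replicate (rest.length - k - 1) 0,
           ((pre.length + k : Nat) : Int), ((pre.length + k : Nat) : Int))) := by
  induction n generalizing rest pre F with
  | zero =>
    have : rest = [] := List.length_eq_zero_iff.1 hn
    subst this
    rw [pvSelLoop]
    simp [PySem.List.min?]
  | succ n ih =>
    obtain ⟨m, hm⟩ : ∃ m, PySem.List.min? rest (fun x => x) = some m := by
      cases hmin : PySem.List.min? rest (fun x => x) with
      | none =>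
        rw [PySem.List.min?_eq_none_iff] at hmin
        subst hmin; simp at hn
      | some m => exact ⟨m, rfl⟩
    obtain ⟨rest', h2⟩ : ∃ r, PySem.List.remove? rest m = some r := by
      cases hrem : PySem.List.remove? rest m with
      | none =>
        rw [PySem.List.remove?_eq_none_iff] at hrem
        exact absurd (PySem.List.min?_mem hm) hrem
      | some r => exact ⟨r, rfl⟩
    have hlen : rest'.length = n := by
      have := pvRemoveMinLen rest rest' m hm h2
      have hmem := PySem.List.min?_mem hm
      rw [PySem.List.remove?_eq_some_erase rest m hmem] at h2
      cases h2
      have := List.length_erase_of_mem hmem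
      omega
    rw [pvSelLoop]
    split
    next heq => rw [hm] at heq; cases heq
    next m1 heq =>
      rw [hm] at heq
      injection heq with heqm
      subst heqm
      split
      next heq2 => rw [h2] at heq2; cases heq2
      next r heq2 =>
        rw [h2] at heq2
        injection heq2 with heqr
        subst heqr
        rw [ih rest' (pre ++ [m]) _ hlen]
        rw [sorted_cons_min rest rest' m hm h2]
        have hr : rest.length = rest'.length + 1 := by omega
        rw [hr, List.range_succ_eq_map]
        simp [List.map_map, Function.comp, List.take_succ_cons]
        intro a _
        omega

-- ===== VERDICT (by name: the statement is the Claim_ definition above) =====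
theorem sleep_sort_spec : Claim_equal_sleep_sort := by
  intro data _
  show sleep_sort data = sleep_sort_alt data
  have hn : (PySem.List.sorted (PySem.List.pyRange 0 (data.length : Int) 1)
      (fun i => PySem.List.pyGetD data i 0) false).length = data.length := by
    rw [PySem.List.length_sorted]
    simp [PySem.List.length_pyRange_one]
  have h := loop_eq data (PySem.List.sorted (PySem.List.pyRange 0 (data.length : Int) 1)
      (fun i => PySem.List.pyGetD data i 0) false) [] []
  rw [hn, vals_eq_sorted data] at h
  simp only [List.nil_append, List.length_nil, Nat.cast_zero, Nat.zero_add] at h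
  unfold sleep_sort sleep_sort_alt
  simp only []
  rw [h, selLoop_eq data.length data [] [] rfl]
  simp
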